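-- pv_equiv track=rewrite | github.com/zzarbttoo/TMT | HI/20200729_5_5.py | solution
-- ===== SOURCE A (Python) =====
-- def solution(N, number):
--     dp = [{N}]
--     if N == number : return 1
--
--     for k in range(2, 9):
--         curr = {int(str(N) * k)}
--         for i in range(int(k / 2)):
--             for x in dp[i]:
--                 for y in dp[k - i - 2]:
--                     curr.update([x + y, x - y, y - x, x * y, x // y, y // x])
--                     if 0 in curr: curr.remove(0)
--         if number in curr:
--             return k
--         dp.append(curr)
--     return -1
-- ===== SOURCE B (Python) =====
-- def solution(N, number):
--     if N == number:
--         return 1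
--
--     def reach(c):
--         # set of values buildable from exactly c copies of N
--         if c == 1:
--             return {N}
--         curr = {int(str(N) * c)}
--         for a in range(1, c // 2 + 1):
--             xs = reach(a)
--             ys = reach(c - a)
--             for x in xs:
--                 for y in ys:
--                     curr.update((x + y, x - y, y - x, x * y, x // y, y // x))
--                     curr.discard(0)
--         return curr
--
--     for k in range(2, 9):
--         if number in reach(k):
--             return k
--     return -1
-- ===== Notes on version B (the rewrite author's own statement) =====
-- stated objective: alternative
-- what changed: Replaces A's bottom-up dp-table loop (a growing list of sets indexed by copy count, with index arithmetic dp[i]/dp[k-i-2]) by a top-down recursion reach(c) on the copy count with no table and no mutable state across counts.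
import Mathlib
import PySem

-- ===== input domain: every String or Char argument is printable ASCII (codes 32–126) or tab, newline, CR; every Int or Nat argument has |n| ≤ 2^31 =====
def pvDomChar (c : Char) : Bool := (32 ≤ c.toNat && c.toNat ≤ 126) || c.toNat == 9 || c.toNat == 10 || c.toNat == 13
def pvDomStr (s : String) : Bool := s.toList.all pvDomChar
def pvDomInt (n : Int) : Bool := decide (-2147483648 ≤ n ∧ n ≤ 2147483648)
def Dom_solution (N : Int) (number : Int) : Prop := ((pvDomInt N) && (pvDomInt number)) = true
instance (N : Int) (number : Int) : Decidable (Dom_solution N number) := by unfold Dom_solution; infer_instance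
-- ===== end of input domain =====

-- B replaces A's bottom-up dp table of sets (indexed dp[i]/dp[k-i-2]) by a top-down recursion
-- reach(c) on the copy count, with no table and no state carried between counts.
-- Both ports model the Python sets as Std.TreeSet Int (one TreeSet operation per Python set
-- operation): the returned Int depends on the sets only through MEMBERSHIP, never through
-- Python's (unmodelled) hash iteration order, so any iteration order gives Python's result.

-- int(str(N) * m)  (always parses for N ≥ 1; the .getD 0 arm is unreachable inside Pre_)
def pvCat (N : Int) (m : Nat) : Int :=
  (PySem.Int.ofChars? (List.flatten (List.replicate m (PySem.Int.toChars N)))).getD 0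

-- ===== PORT A =====
-- curr.update([x+y, x-y, y-x, x*y, x//y, y//x]); if 0 in curr: curr.remove(0)
def pvUpdA (c : Std.TreeSet Int) (x y : Int) : Std.TreeSet Int :=
  let c2 := [x + y, x - y, y - x, x * y, PySem.Int.floordiv x y,
             PySem.Int.floordiv y x].foldl (fun s v => s.insert v) c
  if c2.contains 0 then c2.erase 0 else c2

-- for x in dp[i]: for y in dp[k-i-2]: …
def pvInnerA (cur dpi dpk : Std.TreeSet Int) : Std.TreeSet Int :=
  List.foldl (fun cu x => List.foldl (fun cu2 y => pvUpdA cu2 x y) cu dpk.toList) cur dpi.toList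

-- the loop body building curr for one k; the dp indices A uses are always in range, so the
-- pyGetD default is never read; int(k/2) = k//2 exactly for the k in range(2, 9) A feeds it
def pvCurrA (N : Int) (dp : List (Std.TreeSet Int)) (k : Int) : Std.TreeSet Int :=
  (PySem.List.pyRange 0 (PySem.Int.floordiv k 2) 1).foldl
    (fun cur i => pvInnerA cur (PySem.List.pyGetD dp i Std.TreeSet.empty)
                            (PySem.List.pyGetD dp (k - i - 2) Std.TreeSet.empty))
    (Std.TreeSet.empty.insert (pvCat N k.toNat))

def pvStepA (N number : Int) (st : Option Int × List (Std.TreeSet Int)) (k : Int) :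
    Option Int × List (Std.TreeSet Int) :=
  match st.1 with
  | some _ => st                      -- already returned
  | none =>
    let curr := pvCurrA N st.2 k
    if curr.contains number then (some k, st.2) else (none, st.2 ++ [curr])

def solution (N : Int) (number : Int) : Int :=
  if N = number then 1
  else
    match ((PySem.List.pyRange 2 9 1).foldl (pvStepA N number)
        (none, [Std.TreeSet.empty.insert N])).1 with
    | some k => k
    | none => -1

-- ===== PORT B =====
-- curr.update((x+y, x-y, y-x, x*y, x//y, y//x)) written as six adds; curr.discard(0) = erase if present
def pvUpdB (c : Std.TreeSet Int) (x y : Int) : Std.TreeSet Int :=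
  let c2 := (((((c.insert (x + y)).insert (x - y)).insert (y - x)).insert (x * y)).insert
      (PySem.Int.floordiv x y)).insert (PySem.Int.floordiv y x)
  if c2.contains 0 then c2.erase 0 else c2

-- xs = reach(a); ys = reach(c - a); for x in xs: for y in ys: …
def pvInnerB (cur : Std.TreeSet Int) (xs ys : List Int) : Std.TreeSet Int :=
  List.foldl (fun cu x => List.foldl (fun cu2 y => pvUpdB cu2 x y) cu ys) cur xs

-- reach(c); the fuel argument only makes the recursion structural (fuel ≥ c on every call),
-- `for a in range(1, c//2+1)` is enumerated as a = j+1 for j in range(c//2) — the same splits.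
def pvReachAux (N : Int) : Nat → Nat → Std.TreeSet Int
  | _, 0 => Std.TreeSet.empty.insert N      -- unreachable (reach is never called with c = 0)
  | 0, _ + 1 => Std.TreeSet.empty.insert N  -- unreachable (fuel ≥ c on every call)
  | fuel + 1, c + 1 =>
    if c = 0 then Std.TreeSet.empty.insert N
    else
      (List.range ((c + 1) / 2)).foldl
        (fun cur j => pvInnerB cur (pvReachAux N fuel (j + 1)).toList
                                   (pvReachAux N fuel (c - j)).toList)
        (Std.TreeSet.empty.insert (pvCat N (c + 1)))

def pvReach (N : Int) (c : Nat) : Std.TreeSet Int := pvReachAux N c c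

def pvStepB (N number : Int) (acc : Option Int) (k : Int) : Option Int :=
  match acc with
  | some _ => acc                       -- already returned
  | none => if (pvReach N k.toNat).contains number then some k else none

def solution_alt (N : Int) (number : Int) : Int :=
  if N = number then 1
  else
    match (PySem.List.pyRange 2 9 1).foldl (pvStepB N number) none with
    | some k => k
    | none => -1

-- ===== PRECONDITION & SPEC =====
-- Pre_ excludes exactly the inputs where A raises: for N ≤ 0 with N ≠ number, int(str(N)*k)
-- raises ValueError (N < 0) or x // y raises ZeroDivisionError (N = 0); B raises there too.
def Pre_solution (N : Int) (number : Int) : Prop := N = number ∨ 1 ≤ N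
instance (N : Int) (number : Int) : Decidable (Pre_solution N number) := by
  unfold Pre_solution; infer_instance

def pvWitness_solution : Int × Int := (5, 12)

def Spec_solution (N : Int) (number : Int) (out : Int) : Prop := out = solution_alt N number
instance (N : Int) (number : Int) (out : Int) : Decidable (Spec_solution N number out) := by
  unfold Spec_solution; infer_instance

-- ===== CLAIM (what is proved, stated in full; the proofs are below) =====
def Claim_equal_solution : Prop := ∀ (N : Int) (number : Int), Dom_solution N number → Pre_solution N number → Spec_solution N number (solution N number)

-- ===== LEMMAS AND PROOFS =====

theorem pvUpd_eq (c : Std.TreeSet Int) (x y : Int) : pvUpdA c x y = pvUpdB c x y := by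
  simp [pvUpdA, pvUpdB, List.foldl]

theorem pvInner_eq (cur dpi dpk : Std.TreeSet Int) :
    pvInnerA cur dpi dpk = pvInnerB cur dpi.toList dpk.toList := by
  simp [pvInnerA, pvInnerB, pvUpd_eq]

theorem pvReachAux_fuel (N : Int) : ∀ (c f g : Nat), c ≤ f → c ≤ g →
    pvReachAux N f c = pvReachAux N g c := by
  intro c
  induction c using Nat.strong_induction_on with
  | _ c ih =>
    intro f g hf hg
    match c, f, g, hf, hg with
    | 0, f, g, _, _ => cases f <;> cases g <;> rfl
    | c + 1, f + 1, g + 1, hf, hg =>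
      by_cases hc : c = 0
      · simp [pvReachAux, hc]
      · simp only [pvReachAux, hc, if_false]
        refine PySem.List.foldl_congr_mem _ _ _ _ ?_
        intro acc j hj
        have hj2 : j < (c + 1) / 2 := List.mem_range.mp hj
        rw [ih (j + 1) (by omega) f g (by omega) (by omega),
            ih (c - j) (by omega) f g (by omega) (by omega)]

theorem pvReach_unfold (N : Int) (c : Nat) (hc : 2 ≤ c) :
    pvReach N c = (List.range (c / 2)).foldl
        (fun cur j => pvInnerB cur (pvReach N (j + 1)).toList (pvReach N (c - 1 - j)).toList)
        (Std.TreeSet.empty.insert (pvCat N c)) := by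
  obtain ⟨c', rfl⟩ : ∃ c', c = c' + 1 := ⟨c - 1, by omega⟩
  have hc' : c' ≠ 0 := by omega
  show pvReachAux N (c' + 1) (c' + 1) = _
  simp only [pvReachAux, hc', if_false]
  refine PySem.List.foldl_congr_mem _ _ _ _ ?_
  intro acc j hj
  have hj2 := List.mem_range.mp hj
  have h1 : pvReachAux N c' (j + 1) = pvReach N (j + 1) :=
    pvReachAux_fuel N (j + 1) c' (j + 1) (by omega) le_rfl
  have h2 : pvReachAux N c' (c' - j) = pvReach N (c' + 1 - 1 - j) := by
    have he : c' + 1 - 1 - j = c' - j := by omega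
    rw [he]; exact pvReachAux_fuel N (c' - j) c' (c' - j) (by omega) le_rfl
  rw [h1, h2]

theorem pvReach2 (N : Int) : pvReach N 2 = (pvInnerB (Std.TreeSet.empty.insert (pvCat N 2)) (pvReach N 1).toList (pvReach N 1).toList) := by
  rw [pvReach_unfold N 2 (by norm_num)]; norm_num [List.range_succ]
theorem pvReach3 (N : Int) : pvReach N 3 = (pvInnerB (Std.TreeSet.empty.insert (pvCat N 3)) (pvReach N 1).toList (pvReach N 2).toList) := by
  rw [pvReach_unfold N 3 (by norm_num)]; norm_num [List.range_succ]
theorem pvReach4 (N : Int) : pvReach N 4 = (pvInnerB (pvInnerB (Std.TreeSet.empty.insert (pvCat N 4)) (pvReach N 1).toList (pvReach N 3).toList) (pvReach N 2).toList (pvReach N 2).toList) := by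
  rw [pvReach_unfold N 4 (by norm_num)]; norm_num [List.range_succ]
theorem pvReach5 (N : Int) : pvReach N 5 = (pvInnerB (pvInnerB (Std.TreeSet.empty.insert (pvCat N 5)) (pvReach N 1).toList (pvReach N 4).toList) (pvReach N 2).toList (pvReach N 3).toList) := by
  rw [pvReach_unfold N 5 (by norm_num)]; norm_num [List.range_succ]
theorem pvReach6 (N : Int) : pvReach N 6 = (pvInnerB (pvInnerB (pvInnerB (Std.TreeSet.empty.insert (pvCat N 6)) (pvReach N 1).toList (pvReach N 5).toList) (pvReach N 2).toList (pvReach N 4).toList) (pvReach N 3).toList (pvReach N 3).toList) := by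
  rw [pvReach_unfold N 6 (by norm_num)]; norm_num [List.range_succ]
theorem pvReach7 (N : Int) : pvReach N 7 = (pvInnerB (pvInnerB (pvInnerB (Std.TreeSet.empty.insert (pvCat N 7)) (pvReach N 1).toList (pvReach N 6).toList) (pvReach N 2).toList (pvReach N 5).toList) (pvReach N 3).toList (pvReach N 4).toList) := by
  rw [pvReach_unfold N 7 (by norm_num)]; norm_num [List.range_succ]
theorem pvReach8 (N : Int) : pvReach N 8 = (pvInnerB (pvInnerB (pvInnerB (pvInnerB (Std.TreeSet.empty.insert (pvCat N 8)) (pvReach N 1).toList (pvReach N 7).toList) (pvReach N 2).toList (pvReach N 6).toList) (pvReach N 3).toList (pvReach N 5).toList) (pvReach N 4).toList (pvReach N 4).toList) := by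
  rw [pvReach_unfold N 8 (by norm_num)]; norm_num [List.range_succ]
theorem pvCurr2 (N : Int) : pvCurrA N [pvReach N 1] 2 = pvReach N 2 := by
  rw [pvReach2]
  simp only [pvCurrA, pvInner_eq,
    show PySem.List.pyRange 0 (PySem.Int.floordiv 2 2) 1 = [0] from by decide, List.foldl]
  norm_num [PySem.List.pyGetD, PySem.List.pyGet?, PySem.List.pyIdx?, show Int.toNat 0 = 0 from rfl, show Int.toNat 1 = 1 from rfl, show Int.toNat 2 = 2 from rfl]
theorem pvCurr3 (N : Int) : pvCurrA N [pvReach N 1, pvReach N 2] 3 = pvReach N 3 := by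
  rw [pvReach3]
  simp only [pvCurrA, pvInner_eq,
    show PySem.List.pyRange 0 (PySem.Int.floordiv 3 2) 1 = [0] from by decide, List.foldl]
  norm_num [PySem.List.pyGetD, PySem.List.pyGet?, PySem.List.pyIdx?, show Int.toNat 1 = 1 from rfl, show Int.toNat 3 = 3 from rfl]
theorem pvCurr4 (N : Int) : pvCurrA N [pvReach N 1, pvReach N 2, pvReach N 3] 4 = pvReach N 4 := by
  rw [pvReach4]
  simp only [pvCurrA, pvInner_eq,
    show PySem.List.pyRange 0 (PySem.Int.floordiv 4 2) 1 = [0, 1] from by decide, List.foldl]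
  norm_num [PySem.List.pyGetD, PySem.List.pyGet?, PySem.List.pyIdx?, show Int.toNat 1 = 1 from rfl, show Int.toNat 2 = 2 from rfl, show Int.toNat 4 = 4 from rfl]
theorem pvCurr5 (N : Int) : pvCurrA N [pvReach N 1, pvReach N 2, pvReach N 3, pvReach N 4] 5 = pvReach N 5 := by
  rw [pvReach5]
  simp only [pvCurrA, pvInner_eq,
    show PySem.List.pyRange 0 (PySem.Int.floordiv 5 2) 1 = [0, 1] from by decide, List.foldl]
  norm_num [PySem.List.pyGetD, PySem.List.pyGet?, PySem.List.pyIdx?, show Int.toNat 1 = 1 from rfl, show Int.toNat 2 = 2 from rfl, show Int.toNat 3 = 3 from rfl, show Int.toNat 5 = 5 from rfl]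
theorem pvCurr6 (N : Int) : pvCurrA N [pvReach N 1, pvReach N 2, pvReach N 3, pvReach N 4, pvReach N 5] 6 = pvReach N 6 := by
  rw [pvReach6]
  simp only [pvCurrA, pvInner_eq,
    show PySem.List.pyRange 0 (PySem.Int.floordiv 6 2) 1 = [0, 1, 2] from by decide, List.foldl]
  norm_num [PySem.List.pyGetD, PySem.List.pyGet?, PySem.List.pyIdx?, show Int.toNat 1 = 1 from rfl, show Int.toNat 2 = 2 from rfl, show Int.toNat 3 = 3 from rfl, show Int.toNat 4 = 4 from rfl, show Int.toNat 6 = 6 from rfl]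
theorem pvCurr7 (N : Int) : pvCurrA N [pvReach N 1, pvReach N 2, pvReach N 3, pvReach N 4, pvReach N 5, pvReach N 6] 7 = pvReach N 7 := by
  rw [pvReach7]
  simp only [pvCurrA, pvInner_eq,
    show PySem.List.pyRange 0 (PySem.Int.floordiv 7 2) 1 = [0, 1, 2] from by decide, List.foldl]
  norm_num [PySem.List.pyGetD, PySem.List.pyGet?, PySem.List.pyIdx?, show Int.toNat 1 = 1 from rfl, show Int.toNat 2 = 2 from rfl, show Int.toNat 3 = 3 from rfl, show Int.toNat 4 = 4 from rfl, show Int.toNat 5 = 5 from rfl, show Int.toNat 7 = 7 from rfl]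
theorem pvCurr8 (N : Int) : pvCurrA N [pvReach N 1, pvReach N 2, pvReach N 3, pvReach N 4, pvReach N 5, pvReach N 6, pvReach N 7] 8 = pvReach N 8 := by
  rw [pvReach8]
  simp only [pvCurrA, pvInner_eq,
    show PySem.List.pyRange 0 (PySem.Int.floordiv 8 2) 1 = [0, 1, 2, 3] from by decide, List.foldl]
  norm_num [PySem.List.pyGetD, PySem.List.pyGet?, PySem.List.pyIdx?, show Int.toNat 1 = 1 from rfl, show Int.toNat 2 = 2 from rfl, show Int.toNat 3 = 3 from rfl, show Int.toNat 4 = 4 from rfl, show Int.toNat 5 = 5 from rfl, show Int.toNat 6 = 6 from rfl, show Int.toNat 8 = 8 from rfl]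

theorem pvFrozenA (N number k : Int) : ∀ (l : List Int) (dp : List (Std.TreeSet Int)),
    List.foldl (pvStepA N number) (some k, dp) l = (some k, dp) := by
  intro l
  induction l with
  | nil => intro dp; rfl
  | cons x xs ih => intro dp; simpa [pvStepA] using ih dp

theorem pvFrozenB (N number k : Int) : ∀ (l : List Int),
    List.foldl (pvStepB N number) (some k) l = some k := by
  intro l
  induction l with
  | nil => rfl
  | cons x xs ih => simpa [pvStepB] using ih

theorem pvA2 (N number : Int) : pvStepA N number (none, [pvReach N 1]) 2 =
    if (pvReach N 2).contains number then (some 2, [pvReach N 1]) else (none, [pvReach N 1, pvReach N 2]) := by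
  simp [pvStepA, pvCurr2]
theorem pvB2 (N number : Int) : pvStepB N number none 2 =
    if (pvReach N 2).contains number then some 2 else none := by
  simp [pvStepB, show Int.toNat 2 = 2 from rfl]
theorem pvA3 (N number : Int) : pvStepA N number (none, [pvReach N 1, pvReach N 2]) 3 =
    if (pvReach N 3).contains number then (some 3, [pvReach N 1, pvReach N 2]) else (none, [pvReach N 1, pvReach N 2, pvReach N 3]) := by
  simp [pvStepA, pvCurr3]
theorem pvB3 (N number : Int) : pvStepB N number none 3 =
    if (pvReach N 3).contains number then some 3 else none := by
  simp [pvStepB, show Int.toNat 3 = 3 from rfl]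
theorem pvA4 (N number : Int) : pvStepA N number (none, [pvReach N 1, pvReach N 2, pvReach N 3]) 4 =
    if (pvReach N 4).contains number then (some 4, [pvReach N 1, pvReach N 2, pvReach N 3]) else (none, [pvReach N 1, pvReach N 2, pvReach N 3, pvReach N 4]) := by
  simp [pvStepA, pvCurr4]
theorem pvB4 (N number : Int) : pvStepB N number none 4 =
    if (pvReach N 4).contains number then some 4 else none := by
  simp [pvStepB, show Int.toNat 4 = 4 from rfl]
theorem pvA5 (N number : Int) : pvStepA N number (none, [pvReach N 1, pvReach N 2, pvReach N 3, pvReach N 4]) 5 =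
    if (pvReach N 5).contains number then (some 5, [pvReach N 1, pvReach N 2, pvReach N 3, pvReach N 4]) else (none, [pvReach N 1, pvReach N 2, pvReach N 3, pvReach N 4, pvReach N 5]) := by
  simp [pvStepA, pvCurr5]
theorem pvB5 (N number : Int) : pvStepB N number none 5 =
    if (pvReach N 5).contains number then some 5 else none := by
  simp [pvStepB, show Int.toNat 5 = 5 from rfl]
theorem pvA6 (N number : Int) : pvStepA N number (none, [pvReach N 1, pvReach N 2, pvReach N 3, pvReach N 4, pvReach N 5]) 6 =
    if (pvReach N 6).contains number then (some 6, [pvReach N 1, pvReach N 2, pvReach N 3, pvReach N 4, pvReach N 5]) else (none, [pvReach N 1, pvReach N 2, pvReach N 3, pvReach N 4, pvReach N 5, pvReach N 6]) := by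
  simp [pvStepA, pvCurr6]
theorem pvB6 (N number : Int) : pvStepB N number none 6 =
    if (pvReach N 6).contains number then some 6 else none := by
  simp [pvStepB, show Int.toNat 6 = 6 from rfl]
theorem pvA7 (N number : Int) : pvStepA N number (none, [pvReach N 1, pvReach N 2, pvReach N 3, pvReach N 4, pvReach N 5, pvReach N 6]) 7 =
    if (pvReach N 7).contains number then (some 7, [pvReach N 1, pvReach N 2, pvReach N 3, pvReach N 4, pvReach N 5, pvReach N 6]) else (none, [pvReach N 1, pvReach N 2, pvReach N 3, pvReach N 4, pvReach N 5, pvReach N 6, pvReach N 7]) := by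
  simp [pvStepA, pvCurr7]
theorem pvB7 (N number : Int) : pvStepB N number none 7 =
    if (pvReach N 7).contains number then some 7 else none := by
  simp [pvStepB, show Int.toNat 7 = 7 from rfl]
theorem pvA8 (N number : Int) : pvStepA N number (none, [pvReach N 1, pvReach N 2, pvReach N 3, pvReach N 4, pvReach N 5, pvReach N 6, pvReach N 7]) 8 =
    if (pvReach N 8).contains number then (some 8, [pvReach N 1, pvReach N 2, pvReach N 3, pvReach N 4, pvReach N 5, pvReach N 6, pvReach N 7]) else (none, [pvReach N 1, pvReach N 2, pvReach N 3, pvReach N 4, pvReach N 5, pvReach N 6, pvReach N 7, pvReach N 8]) := by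
  simp [pvStepA, pvCurr8]
theorem pvB8 (N number : Int) : pvStepB N number none 8 =
    if (pvReach N 8).contains number then some 8 else none := by
  simp [pvStepB, show Int.toNat 8 = 8 from rfl]

-- ===== VERDICT (by name: the statement is the Claim_ definition above) =====
theorem solution_spec : Claim_equal_solution := by
  intro N number _ _
  unfold Spec_solution solution solution_alt
  by_cases hN : N = number
  · subst hN; rw [if_pos rfl, if_pos rfl]
  · rw [if_neg hN, if_neg hN,
      show PySem.List.pyRange 2 9 1 = [2, 3, 4, 5, 6, 7, 8] from by decide,
      show Std.TreeSet.empty.insert N = pvReach N 1 from rfl]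
    rw [List.foldl_cons (f := pvStepA N number), List.foldl_cons (f := pvStepB N number), pvA2, pvB2]
    by_cases h2 : (pvReach N 2).contains number = true
    · rw [if_pos h2, if_pos h2, pvFrozenA, pvFrozenB]
    · rw [if_neg h2, if_neg h2]
      rw [List.foldl_cons (f := pvStepA N number), List.foldl_cons (f := pvStepB N number), pvA3, pvB3]
      by_cases h3 : (pvReach N 3).contains number = true
      · rw [if_pos h3, if_pos h3, pvFrozenA, pvFrozenB]
      · rw [if_neg h3, if_neg h3]
        rw [List.foldl_cons (f := pvStepA N number), List.foldl_cons (f := pvStepB N number), pvA4, pvB4]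
        by_cases h4 : (pvReach N 4).contains number = true
        · rw [if_pos h4, if_pos h4, pvFrozenA, pvFrozenB]
        · rw [if_neg h4, if_neg h4]
          rw [List.foldl_cons (f := pvStepA N number), List.foldl_cons (f := pvStepB N number), pvA5, pvB5]
          by_cases h5 : (pvReach N 5).contains number = true
          · rw [if_pos h5, if_pos h5, pvFrozenA, pvFrozenB]
          · rw [if_neg h5, if_neg h5]
            rw [List.foldl_cons (f := pvStepA N number), List.foldl_cons (f := pvStepB N number), pvA6, pvB6]
            by_cases h6 : (pvReach N 6).contains number = true
            · rw [if_pos h6, if_pos h6, pvFrozenA, pvFrozenB]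
            · rw [if_neg h6, if_neg h6]
              rw [List.foldl_cons (f := pvStepA N number), List.foldl_cons (f := pvStepB N number), pvA7, pvB7]
              by_cases h7 : (pvReach N 7).contains number = true
              · rw [if_pos h7, if_pos h7, pvFrozenA, pvFrozenB]
              · rw [if_neg h7, if_neg h7]
                rw [List.foldl_cons (f := pvStepA N number), List.foldl_cons (f := pvStepB N number), pvA8, pvB8]
                by_cases h8 : (pvReach N 8).contains number = true
                · rw [if_pos h8, if_pos h8, pvFrozenA, pvFrozenB]
                · rw [if_neg h8, if_neg h8]
                  rfl
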